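-- pv_equiv track=rewrite | github.com/kent-rasmussen/azt | alphabet_comparison_pdf.py | make_signatures
-- ===== SOURCE A (Python) =====
-- def make_signatures(pages):
--     """
--     Reorders a list of pages for a single saddle-stitch booklet.
--     Input: [1, 2, 3, 4, 5, 6, 7, 8] (8 pages, 2 sheets)
--
--     Sheet 1 Front: [8, 1]
--     Sheet 1 Back:  [2, 7]
--     Sheet 2 Front: [6, 3]
--     Sheet 2 Back:  [4, 5]
--
--     Output: [8, 1, 2, 7, 6, 3, 4, 5]
--     """
--     pages = list(pages)
--
--     # 1. Pad to multiple of 4 (Safety check, though we did it)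
--     n = len(pages)
--     rem = n % 4
--     if rem > 0:
--         pages.extend([None] * (4 - rem))
--
--     n = len(pages)
--     reordered = []
--
--     # Use 0-based indexing pointers
--     p_start = 0
--     p_end = n - 1
--
--     while p_start < p_end:
--         # Sheet Side A (Front): First and Last remaining
--         # Left side of page is Last (p_end), Right side is First (p_start)
--         reordered.append(pages[p_end])
--         reordered.append(pages[p_start])
--
--         p_start += 1
--         p_end -= 1
--
--         # Sheet Side B (Back): Next First and Next Last
--         # Left side of page is Next First (p_start), Right side is Next Last (p_end)
--         if p_start >= p_end:
--             break
--
--         reordered.append(pages[p_start])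
--         reordered.append(pages[p_end])
--
--         p_start += 1
--         p_end -= 1
--
--     return reordered
-- ===== SOURCE B (Python) =====
-- def make_signatures(pages):
--     pages = list(pages)
--     rem = len(pages) % 4
--     if rem:
--         pages = pages + [None] * (4 - rem)
--     out = []
--     while pages:
--         # peel one sheet: the first two and the last two remaining pages
--         first, second, *mid, penult, last = pages
--         out.extend([last, first, second, penult])
--         pages = mid
--     return out
-- ===== Notes on version B (the rewrite author's own statement) =====
-- stated objective: simpler
-- what changed: Replaces A's two converging index pointers with break logic by a structural loop that peels the first two and last two elements off the padded list each iteration via tuple unpacking.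
import Mathlib
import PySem

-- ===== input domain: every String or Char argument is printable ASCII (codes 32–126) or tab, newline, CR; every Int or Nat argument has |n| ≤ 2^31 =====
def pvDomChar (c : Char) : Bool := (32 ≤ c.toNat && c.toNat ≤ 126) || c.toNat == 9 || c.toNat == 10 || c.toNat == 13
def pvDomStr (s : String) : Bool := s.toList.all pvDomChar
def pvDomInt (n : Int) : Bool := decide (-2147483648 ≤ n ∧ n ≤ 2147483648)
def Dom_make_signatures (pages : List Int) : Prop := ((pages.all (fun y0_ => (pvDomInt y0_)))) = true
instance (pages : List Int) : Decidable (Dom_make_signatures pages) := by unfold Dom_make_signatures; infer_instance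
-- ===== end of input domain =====

-- B replaces A's two converging index pointers (with mid-loop break) by a structural loop
-- that peels the first two and last two pages off the padded list each sheet (objective: simpler).

-- ===== PORT A =====
-- pages[i] for a Nat index; every reachable access in A's loop is in range, so the
-- `.getD none` default is never used (pyGet? is exact Python indexing).
def pvIdx (l : List (Option Int)) (i : Nat) : Option Int :=
  (PySem.List.pyGet? l (Int.ofNat i)).getD none

-- padding step shared by both Pythons: pad with None to a multiple of 4
def pvPad (pages : List Int) : List (Option Int) :=
  let p := pages.map (fun x => some x)
  let rem := pages.length % 4
  if rem > 0 then p ++ List.replicate (4 - rem) (none : Option Int) else p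

-- A's while-loop over the two pointers p_start/p_end (Nat pointers: both start ≥ 0 and
-- p_end only ever decreases while > p_start, matching Python's values on the reachable states)
def pvLoopA (l : List (Option Int)) (s e : Nat) (acc : List (Option Int)) : List (Option Int) :=
  if s < e then
    if s + 1 ≥ e - 1 then acc ++ [pvIdx l e, pvIdx l s]
    else pvLoopA l (s + 2) (e - 2) (acc ++ [pvIdx l e, pvIdx l s, pvIdx l (s + 1), pvIdx l (e - 1)])
  else acc
termination_by e - s
decreasing_by omega

def make_signatures (pages : List Int) : List (Option Int) :=
  let p := pvPad pages
  pvLoopA p 0 (p.length - 1) []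

-- ===== PORT B =====
-- B's while-loop: first, second, *mid, penult, last = pages (requires len ≥ 4, which always
-- holds when reached since the length is a positive multiple of 4; mid = all but the outer two pairs)
def pvPeel (l : List (Option Int)) : List (Option Int) :=
  if l = [] then []
  else
    pvIdx l (l.length - 1) :: pvIdx l 0 :: pvIdx l 1 :: pvIdx l (l.length - 2) ::
      pvPeel ((l.drop 2).dropLast.dropLast)
termination_by l.length
decreasing_by rename_i h; have := List.length_pos_of_ne_nil h; simp [List.length_dropLast]; omega

def make_signatures_alt (pages : List Int) : List (Option Int) :=
  pvPeel (pvPad pages)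

-- ===== PRECONDITION & SPEC =====
def Spec_make_signatures (pages : List Int) (out : List (Option Int)) : Prop := out = make_signatures_alt pages
instance (pages : List Int) (out : List (Option Int)) : Decidable (Spec_make_signatures pages out) := by unfold Spec_make_signatures; infer_instance

-- ===== CLAIM (what is proved, stated in full; the proofs are below) =====
def Claim_equal_make_signatures : Prop := ∀ (pages : List Int), Dom_make_signatures pages → Spec_make_signatures pages (make_signatures pages)

-- ===== LEMMAS AND PROOFS =====

lemma pvPeel_nil : pvPeel [] = [] := by
  rw [pvPeel.eq_def]
  simp

lemma pvIdx_eq_getD (l : List (Option Int)) (i : Nat) : pvIdx l i = l.getD i none := by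
  simp [pvIdx, PySem.List.pyGet?_natCast, List.getD]

lemma take_dropLast (ys : List (Option Int)) (m : Nat) (h : m ≤ ys.length) :
    (ys.take m).dropLast = ys.take (m - 1) := by
  rw [List.dropLast_eq_take, List.length_take, List.take_take]
  congr 1
  omega

lemma pvLoopA_eq (l : List (Option Int)) :
    ∀ (d s e : Nat) (acc : List (Option Int)), e - s ≤ d → e < l.length →
      (e + 1 - s) % 4 = 0 →
      pvLoopA l s e acc = acc ++ pvPeel ((l.drop s).take (e + 1 - s)) := by
  intro d
  induction d with
  | zero =>
    intro s e acc hd he h4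
    have hse : ¬ s < e := by omega
    rw [pvLoopA, if_neg hse]
    have : e + 1 - s = 0 := by omega
    rw [this]
    simp [pvPeel_nil]
  | succ d ih =>
    intro s e acc hd he h4
    by_cases hse : s < e
    · -- window length L = e+1-s ≥ 2 and ≡ 0 mod 4, hence ≥ 4, i.e. e ≥ s+3
      have hL4 : 4 ≤ e + 1 - s := by omega
      have hni : ¬ s + 1 ≥ e - 1 := by omega
      rw [pvLoopA, if_pos hse, if_neg hni]
      -- destructure the window
      set w : List (Option Int) := (l.drop s).take (e + 1 - s) with hw
      have hwlen : w.length = e + 1 - s := by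
        simp [hw]; omega
      have hwne : w ≠ [] := by
        intro h; rw [h] at hwlen; simp at hwlen; omega
      rw [pvPeel.eq_def, if_neg hwne]
      -- the four sheet entries
      have hget : ∀ i : Nat, i < e + 1 - s → pvIdx w i = pvIdx l (s + i) := by
        intro i hi
        rw [pvIdx_eq_getD, pvIdx_eq_getD, List.getD, List.getD, hw]
        rw [List.getElem?_take_of_lt hi, List.getElem?_drop]
      -- the middle of the window is the window of the inner pointers
      have hmid : (w.drop 2).dropLast.dropLast = (l.drop (s + 2)).take (e - 2 + 1 - (s + 2)) := by
        rw [hw, List.drop_take, List.drop_drop]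
        have h1 : e + 1 - s - 2 ≤ (l.drop (s + 2)).length := by
          simp; omega
        have h2 : e + 1 - s - 2 - 1 ≤ (l.drop (s + 2)).length := by
          simp; omega
        rw [take_dropLast _ _ h1, take_dropLast _ _ h2]
        congr 1
        omega
      rw [ih (s + 2) (e - 2) _ (by omega) (by omega) (by omega), hmid]
      rw [hwlen]
      have e1 : e + 1 - s - 1 = e - s := by omega
      have e2 : e + 1 - s - 2 = e - s - 1 := by omega
      rw [e1, e2, hget (e - s) (by omega), hget 0 (by omega), hget 1 (by omega),
          hget (e - s - 1) (by omega)]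
      have g1 : s + (e - s) = e := by omega
      have g2 : s + (e - s - 1) = e - 1 := by omega
      rw [g1, g2]
      simp
    · rw [pvLoopA, if_neg hse]
      have : e + 1 - s = 0 ∨ e + 1 - s = 1 := by omega
      have h0 : e + 1 - s = 0 := by omega
      rw [h0]
      simp [pvPeel_nil]

lemma pvPad_len (pages : List Int) : (pvPad pages).length % 4 = 0 := by
  simp only [pvPad]
  split <;> simp <;> omega

-- ===== VERDICT (by name: the statement is the Claim_ definition above) =====
theorem make_signatures_spec : Claim_equal_make_signatures := by
  intro pages _
  unfold Spec_make_signatures make_signatures make_signatures_alt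
  by_cases h : pvPad pages = []
  · rw [h]
    simp [pvLoopA, pvPeel_nil]
  · have hlen : (pvPad pages).length % 4 = 0 := pvPad_len pages
    have hpos : 0 < (pvPad pages).length := List.length_pos_of_ne_nil h
    rw [pvLoopA_eq (pvPad pages) (pvPad pages).length 0 ((pvPad pages).length - 1) []
        (by omega) (by omega) (by omega)]
    rw [List.nil_append, List.drop_zero]
    have : (pvPad pages).length - 1 + 1 - 0 = (pvPad pages).length := by omega
    rw [this, List.take_length]
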